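-- pv_equiv track=rewrite | github.com/sethdford/seaclaw | scripts/mine_all_data.py | build_conversation_windows
-- ===== SOURCE A (Python) =====
-- MAX_GAP_SECONDS = 3600
--
-- def build_conversation_windows(chat_messages):
--     windows = []
--     current = []
--     for msg in chat_messages:
--         if current and msg["timestamp"] - current[-1]["timestamp"] > MAX_GAP_SECONDS:
--             if current:
--                 windows.append(current)
--             current = []
--         current.append(msg)
--     if current:
--         windows.append(current)
--     return windows
-- ===== SOURCE B (Python) =====
-- MAX_GAP_SECONDS = 3600
--
-- def build_conversation_windows(chat_messages):
--     windows = []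
--     n = len(chat_messages)
--     start = 0
--     while start < n:
--         end = start + 1
--         while end < n and chat_messages[end]["timestamp"] - chat_messages[end - 1]["timestamp"] <= MAX_GAP_SECONDS:
--             end += 1
--         windows.append(chat_messages[start:end])
--         start = end
--     return windows
-- ===== Notes on version B (the rewrite author's own statement) =====
-- stated objective: alternative
-- what changed: Replaces the append/reset accumulator with a two-pointer scan: for each window it advances an end index past the maximal gap-free run and emits the slice chat_messages[start:end] in one step.
import Mathlib
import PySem

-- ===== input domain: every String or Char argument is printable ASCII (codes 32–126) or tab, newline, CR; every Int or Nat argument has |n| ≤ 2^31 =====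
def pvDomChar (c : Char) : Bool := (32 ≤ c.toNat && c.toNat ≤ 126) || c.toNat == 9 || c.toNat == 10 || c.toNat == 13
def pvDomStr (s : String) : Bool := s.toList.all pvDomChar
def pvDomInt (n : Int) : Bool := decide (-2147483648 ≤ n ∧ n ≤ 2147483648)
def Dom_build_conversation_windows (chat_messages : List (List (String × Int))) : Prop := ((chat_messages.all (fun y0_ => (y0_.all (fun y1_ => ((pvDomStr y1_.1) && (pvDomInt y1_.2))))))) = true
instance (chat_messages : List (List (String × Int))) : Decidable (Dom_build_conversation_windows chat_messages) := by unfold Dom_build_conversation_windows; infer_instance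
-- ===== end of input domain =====

-- B changes the decomposition only (two-pointer maximal-run scan instead of A's append/reset
-- accumulator); same O(n) cost, same return value on all inputs where A returns.

-- msg["timestamp"]: first-match dict lookup; `.getD 0` is only reached outside Pre_ (KeyError in Python)
def pvTs (m : List (String × Int)) : Int := ((PySem.Dict.mk m).get? "timestamp").getD 0

-- ===== PORT A =====
-- loop body of A: `if current and msg["timestamp"] - current[-1]["timestamp"] > MAX_GAP_SECONDS: windows.append(current); current = []` then `current.append(msg)`
-- (`current[-1]` is ported as getLast!, exact because the conjunction guards it with current ≠ [])
def pvStepA (s : List (List (List (String × Int))) × List (List (String × Int)))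
    (msg : List (String × Int)) :
    List (List (List (String × Int))) × List (List (String × Int)) :=
  if s.2 ≠ [] ∧ pvTs msg - pvTs (s.2.getLast!) > 3600 then
    (s.1 ++ [s.2], [msg])
  else
    (s.1, s.2 ++ [msg])

def build_conversation_windows (chat_messages : List (List (String × Int))) : List (List (List (String × Int))) :=
  let r := chat_messages.foldl pvStepA ([], [])
  if r.2 ≠ [] then r.1 ++ [r.2] else r.1

-- ===== PORT B =====
-- inner while loop of B: starting just after `prev`, consume the maximal gap-free run;
-- returns (the run = chat_messages[start+1:end], the remaining suffix chat_messages[end:])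
def pvTakeChain (prev : List (String × Int)) (msgs : List (List (String × Int))) :
    List (List (String × Int)) × List (List (String × Int)) :=
  match msgs with
  | [] => ([], [])
  | m :: ms =>
    if pvTs m - pvTs prev ≤ 3600 then
      let p := pvTakeChain m ms
      (m :: p.1, p.2)
    else
      ([], m :: ms)

theorem pvTakeChain_snd_length (prev : List (String × Int)) (msgs : List (List (String × Int))) :
    (pvTakeChain prev msgs).2.length ≤ msgs.length := by
  induction msgs generalizing prev with
  | nil => simp [pvTakeChain]
  | cons m ms ih =>
    simp only [pvTakeChain]
    split
    · exact le_trans (ih m) (Nat.le_succ _)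
    · simp

-- outer while loop of B: emit the window starting at the current position, continue at `end`
def build_conversation_windows_alt (chat_messages : List (List (String × Int))) : List (List (List (String × Int))) :=
  match chat_messages with
  | [] => []
  | m :: ms =>
    let p := pvTakeChain m ms
    (m :: p.1) :: build_conversation_windows_alt p.2
termination_by chat_messages.length
decreasing_by
  exact Nat.lt_succ_of_le (pvTakeChain_snd_length m ms)

-- ===== PRECONDITION & SPEC =====
-- Pre_: exactly the inputs on which Python A returns (with ≥ 2 messages every message's
-- "timestamp" is looked up, so a missing key raises KeyError; with ≤ 1 message no lookup happens)
def Pre_build_conversation_windows (chat_messages : List (List (String × Int))) : Prop :=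
  chat_messages.length ≤ 1 ∨
    ∀ m ∈ chat_messages, ((PySem.Dict.mk m).get? "timestamp").isSome = true

instance (chat_messages : List (List (String × Int))) : Decidable (Pre_build_conversation_windows chat_messages) := by
  unfold Pre_build_conversation_windows; infer_instance

def pvWitness_build_conversation_windows : (List (List (String × Int))) :=
  [[("timestamp", 0)], [("timestamp", 5000)]]

def Spec_build_conversation_windows (chat_messages : List (List (String × Int))) (out : List (List (List (String × Int)))) : Prop := out = build_conversation_windows_alt chat_messages
instance (chat_messages : List (List (String × Int))) (out : List (List (List (String × Int)))) : Decidable (Spec_build_conversation_windows chat_messages out) := by unfold Spec_build_conversation_windows; infer_instance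

-- ===== CLAIM (what is proved, stated in full; the proofs are below) =====
def Claim_equal_build_conversation_windows : Prop := ∀ (chat_messages : List (List (String × Int))), Dom_build_conversation_windows chat_messages → Pre_build_conversation_windows chat_messages → Spec_build_conversation_windows chat_messages (build_conversation_windows chat_messages)

-- ===== LEMMAS AND PROOFS =====

-- A's loop, unrolled relative to a nonempty current window
def pvConsume (cur : List (List (String × Int))) (l : List (List (String × Int))) :
    List (List (List (String × Int))) :=
  match l with
  | [] => [cur]
  | m :: ms =>
    if pvTs m - pvTs cur.getLast! > 3600 then
      cur :: pvConsume [m] ms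
    else
      pvConsume (cur ++ [m]) ms

theorem pvGetLast!_concat (c : List (List (String × Int))) (p : List (String × Int)) :
    (c ++ [p]).getLast! = p := by
  rw [List.getLast!_eq_getLast?_getD, List.getLast?_concat]
  rfl

theorem foldA_consume (l : List (List (String × Int)))
    (ws : List (List (List (String × Int)))) (cur : List (List (String × Int)))
    (h : cur ≠ []) :
    (let r := l.foldl pvStepA (ws, cur);
      if r.2 ≠ [] then r.1 ++ [r.2] else r.1) = ws ++ pvConsume cur l := by
  induction l generalizing ws cur with
  | nil => simp [pvConsume, h]
  | cons m ms ih =>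
    simp only [List.foldl_cons, pvConsume]
    by_cases hg : pvTs m - pvTs cur.getLast! > 3600
    · have hs : pvStepA (ws, cur) m = (ws ++ [cur], [m]) := by
        unfold pvStepA; rw [if_pos ⟨h, hg⟩]
      rw [hs, ih _ _ (by simp), if_pos hg, List.append_assoc]
      simp
    · have hs : pvStepA (ws, cur) m = (ws, cur ++ [m]) := by
        unfold pvStepA
        rw [if_neg (by rintro ⟨_, hx⟩; exact hg hx)]
      rw [hs, ih _ _ (by simp), if_neg hg]

theorem consume_alt (l : List (List (String × Int)))
    (c : List (List (String × Int))) (prev : List (String × Int)) :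
    pvConsume (c ++ [prev]) l =
      ((c ++ [prev]) ++ (pvTakeChain prev l).1) ::
        build_conversation_windows_alt (pvTakeChain prev l).2 := by
  induction l generalizing c prev with
  | nil => simp [pvConsume, pvTakeChain, build_conversation_windows_alt]
  | cons m ms ih =>
    simp only [pvConsume, pvTakeChain, pvGetLast!_concat]
    by_cases hg : pvTs m - pvTs prev > 3600
    · rw [if_pos hg, if_neg (by omega)]
      have h1 := ih [] m
      simp only [List.nil_append] at h1
      rw [h1]
      simp [build_conversation_windows_alt]
    · rw [if_neg hg, if_pos (by omega)]
      have h1 := ih (c ++ [prev]) m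
      simp only [List.append_assoc] at h1 ⊢
      rw [h1]
      simp

-- ===== VERDICT (by name: the statement is the Claim_ definition above) =====
theorem build_conversation_windows_spec : Claim_equal_build_conversation_windows := by
  intro cm _ _
  unfold Spec_build_conversation_windows build_conversation_windows
  cases cm with
  | nil => simp [build_conversation_windows_alt]
  | cons m ms =>
    have h1 : pvStepA ([], []) m = ([], [m]) := by
      unfold pvStepA; rw [if_neg (by rintro ⟨hx, _⟩; exact hx rfl)]; rfl
    rw [List.foldl_cons, h1]
    have h2 := foldA_consume ms [] [m] (by simp)
    simp only [List.nil_append] at h2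
    rw [h2]
    have h3 := consume_alt ms [] m
    simp only [List.nil_append] at h3
    rw [h3]
    simp [build_conversation_windows_alt]
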